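-- pv_equiv track=rewrite | github.com/gabrielelamalfakcl/fairness-aware-ppo | environments/Hospital/players.py | generate_patient_features
-- ===== SOURCE A (Python) =====
-- SYMPTOM_LIST = [
--     'fever', 'cough', 'minor_pain', 'chest_pain', 'shortness_of_breath',
--     'high_blood_pressure', 'agitation', 'confusion', 'severe_trauma',
--     'unconsciousness', 'suspected_fracture', 'is_child'
-- ]
--
-- def generate_patient_features(true_illness: str):
--     """
--     Generates a dictionary of deterministic symptom features based on a patient's true illness
--     """
--
--     symptoms = {s: 0 for s in SYMPTOM_LIST}
--
--     if true_illness == 'pediatric':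
--         symptoms['is_child'] = 1
--         symptoms['fever'] = 1
--         symptoms['cough'] = 1
--
--     elif true_illness == 'general':
--         symptoms['fever'] = 1
--         symptoms['minor_pain'] = 1
--
--     elif true_illness == 'cardio':
--         symptoms['chest_pain'] = 1
--         symptoms['shortness_of_breath'] = 1
--         symptoms['high_blood_pressure'] = 1
--
--     elif true_illness == 'xray':
--         symptoms['suspected_fracture'] = 1
--         symptoms['minor_pain'] = 1
--
--     elif true_illness == 'psychiatric':
--         symptoms['confusion'] = 1
--         symptoms['high_blood_pressure'] = 1
--
--     elif true_illness == 'emergency':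
--         symptoms['unconsciousness'] = 1
--         symptoms['chest_pain'] = 1
--         symptoms['shortness_of_breath'] = 1
--
--     return symptoms
-- ===== SOURCE B (Python) =====
-- SYMPTOM_LIST = [
--     'fever', 'cough', 'minor_pain', 'chest_pain', 'shortness_of_breath',
--     'high_blood_pressure', 'agitation', 'confusion', 'severe_trauma',
--     'unconsciousness', 'suspected_fracture', 'is_child'
-- ]
--
-- # Each illness is encoded as ONE integer bitmask: bit i set <=> SYMPTOM_LIST[i] is active.
-- # fever=0, cough=1, minor_pain=2, chest_pain=3, shortness_of_breath=4,
-- # high_blood_pressure=5, agitation=6, confusion=7, severe_trauma=8,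
-- # unconsciousness=9, suspected_fracture=10, is_child=11
-- ILLNESS_MASK = {
--     'pediatric':   0b100000000011,  # is_child | fever | cough
--     'general':     0b000000000101,  # fever | minor_pain
--     'cardio':      0b000000111000,  # chest_pain | shortness_of_breath | high_blood_pressure
--     'xray':        0b010000000100,  # suspected_fracture | minor_pain
--     'psychiatric': 0b000010100000,  # confusion | high_blood_pressure
--     'emergency':   0b001000011000,  # unconsciousness | chest_pain | shortness_of_breath
-- }
--
-- def generate_patient_features(true_illness: str):
--     """
--     Generates a dictionary of deterministic symptom features based on a patient's true illness
--     """
--     mask = ILLNESS_MASK.get(true_illness, 0)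
--     return {s: (mask >> i) & 1 for i, s in enumerate(SYMPTOM_LIST)}
-- ===== Notes on version B (the rewrite author's own statement) =====
-- stated objective: alternative
-- what changed: Replaces the if/elif cascade of dict mutations with a bitmask encoding: each illness maps to one integer whose bit i marks SYMPTOM_LIST[i] active, and the dict is decoded from the mask by per-index bit extraction.
import Mathlib
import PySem

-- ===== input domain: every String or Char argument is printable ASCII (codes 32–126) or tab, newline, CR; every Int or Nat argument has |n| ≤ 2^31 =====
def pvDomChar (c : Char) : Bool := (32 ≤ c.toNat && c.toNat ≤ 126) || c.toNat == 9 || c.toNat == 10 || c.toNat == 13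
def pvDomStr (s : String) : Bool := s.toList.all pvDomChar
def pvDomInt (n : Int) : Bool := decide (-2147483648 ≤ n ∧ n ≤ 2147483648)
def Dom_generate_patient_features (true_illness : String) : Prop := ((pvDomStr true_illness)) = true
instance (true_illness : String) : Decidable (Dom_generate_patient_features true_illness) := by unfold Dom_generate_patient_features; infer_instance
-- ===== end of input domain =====

-- B encodes each illness as one integer bitmask and decodes the symptom dict from its bits,
-- replacing A's if/elif cascade of dict mutations (objective: alternative); same return value.

def SYMPTOM_LIST : List String :=
  ["fever", "cough", "minor_pain", "chest_pain", "shortness_of_breath",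
   "high_blood_pressure", "agitation", "confusion", "severe_trauma",
   "unconsciousness", "suspected_fracture", "is_child"]

-- ===== PORT A =====
def generate_patient_features (true_illness : String) : List (String × Int) :=
  -- symptoms = {s: 0 for s in SYMPTOM_LIST}
  let symptoms : PySem.Dict String Int :=
    SYMPTOM_LIST.foldl (fun d s => d.insert s 0) PySem.Dict.empty
  let symptoms :=
    if true_illness == "pediatric" then
      ((symptoms.insert "is_child" 1).insert "fever" 1).insert "cough" 1
    else if true_illness == "general" then
      (symptoms.insert "fever" 1).insert "minor_pain" 1
    else if true_illness == "cardio" then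
      ((symptoms.insert "chest_pain" 1).insert "shortness_of_breath" 1).insert "high_blood_pressure" 1
    else if true_illness == "xray" then
      (symptoms.insert "suspected_fracture" 1).insert "minor_pain" 1
    else if true_illness == "psychiatric" then
      (symptoms.insert "confusion" 1).insert "high_blood_pressure" 1
    else if true_illness == "emergency" then
      ((symptoms.insert "unconsciousness" 1).insert "chest_pain" 1).insert "shortness_of_breath" 1
    else symptoms
  symptoms.items

-- ===== PORT B =====
def ILLNESS_MASK : PySem.Dict String Int :=
  PySem.Dict.ofList
    [("pediatric", 0b100000000011),
     ("general", 0b000000000101),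
     ("cardio", 0b000000111000),
     ("xray", 0b010000000100),
     ("psychiatric", 0b000010100000),
     ("emergency", 0b001000011000)]

def generate_patient_features_alt (true_illness : String) : List (String × Int) :=
  let mask := ILLNESS_MASK.getD true_illness 0
  -- {s: (mask >> i) & 1 for i, s in enumerate(SYMPTOM_LIST)}
  -- (mask >> i) & 1 on a nonnegative Python int is exactly (mask / 2^i) % 2
  -- (all masks in the table are nonnegative literals; Lean Int division/mod agree with
  -- Python's on nonnegative operands).
  (PySem.List.enumerate SYMPTOM_LIST).foldl
    (fun (d : PySem.Dict String Int) p =>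
      d.insert p.2 ((mask / (2 ^ p.1.toNat)) % 2))
    PySem.Dict.empty |>.items

-- ===== PRECONDITION & SPEC =====
def Spec_generate_patient_features (true_illness : String) (out : List (String × Int)) : Prop := out = generate_patient_features_alt true_illness
instance (true_illness : String) (out : List (String × Int)) : Decidable (Spec_generate_patient_features true_illness out) := by unfold Spec_generate_patient_features; infer_instance

-- ===== CLAIM =====
def Claim_equal_generate_patient_features : Prop := ∀ (true_illness : String), Dom_generate_patient_features true_illness → Spec_generate_patient_features true_illness (generate_patient_features true_illness)

-- ===== LEMMAS AND PROOFS =====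

-- ===== VERDICT =====
theorem generate_patient_features_spec : Claim_equal_generate_patient_features := by
  intro ti _
  unfold Spec_generate_patient_features generate_patient_features generate_patient_features_alt
  by_cases h1 : ti = "pediatric"; · subst h1; decide
  by_cases h2 : ti = "general"; · subst h2; decide
  by_cases h3 : ti = "cardio"; · subst h3; decide
  by_cases h4 : ti = "xray"; · subst h4; decide
  by_cases h5 : ti = "psychiatric"; · subst h5; decide
  by_cases h6 : ti = "emergency"; · subst h6; decide
  have g1 : (("pediatric" : String) == ti) = false := by simp [Ne.symm h1]
  have g2 : (("general" : String) == ti) = false := by simp [Ne.symm h2]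
  have g3 : (("cardio" : String) == ti) = false := by simp [Ne.symm h3]
  have g4 : (("xray" : String) == ti) = false := by simp [Ne.symm h4]
  have g5 : (("psychiatric" : String) == ti) = false := by simp [Ne.symm h5]
  have g6 : (("emergency" : String) == ti) = false := by simp [Ne.symm h6]
  have hI : ILLNESS_MASK = PySem.Dict.mk
      [("pediatric", 0b100000000011),
       ("general", 0b000000000101),
       ("cardio", 0b000000111000),
       ("xray", 0b010000000100),
       ("psychiatric", 0b000010100000),
       ("emergency", 0b001000011000)] := by rfl
  simp [hI, SYMPTOM_LIST, PySem.Dict.getD, PySem.Dict.get?, List.find?,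
        PySem.Dict.insert, PySem.Dict.empty, PySem.List.enumerate,
        h1, h2, h3, h4, h5, h6, g1, g2, g3, g4, g5, g6]
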